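-- pv_equiv track=rewrite | github.com/MrBrantCode/unitest_baseline | mut_generate/mist_train_cf/cf_61560/solution.py | get_positive_and_sort
-- ===== SOURCE A (Python) =====
-- def get_positive_and_sort(numbers: list):
--     def swap_elements(n: list, index1: int, index2: int):
--         temp = n[index1]
--         n[index1] = n[index2]
--         n[index2] = temp
--
--     # Filter the list for positive numbers only
--     numbers = [num for num in numbers if num > 0]
--
--     # Implement bubble sort
--     for i in range(len(numbers)):
--         for j in range(len(numbers) - 1):
--             if numbers[j] > numbers[j + 1]:
--                 swap_elements(numbers, j, j + 1)
--
--     return numbers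
-- ===== SOURCE B (Python) =====
-- def get_positive_and_sort(numbers: list):
--     # Idiomatic: filter positives, let the library sort (Timsort) do the work.
--     return sorted(num for num in numbers if num > 0)
-- ===== Notes on version B (the rewrite author's own statement) =====
-- stated objective: idiomatic
-- what changed: Replaces the hand-rolled index-swapping bubble sort (nested loops with a swap helper) by a single call to the built-in sorted() over a generator that keeps the positives.
import Mathlib
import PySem

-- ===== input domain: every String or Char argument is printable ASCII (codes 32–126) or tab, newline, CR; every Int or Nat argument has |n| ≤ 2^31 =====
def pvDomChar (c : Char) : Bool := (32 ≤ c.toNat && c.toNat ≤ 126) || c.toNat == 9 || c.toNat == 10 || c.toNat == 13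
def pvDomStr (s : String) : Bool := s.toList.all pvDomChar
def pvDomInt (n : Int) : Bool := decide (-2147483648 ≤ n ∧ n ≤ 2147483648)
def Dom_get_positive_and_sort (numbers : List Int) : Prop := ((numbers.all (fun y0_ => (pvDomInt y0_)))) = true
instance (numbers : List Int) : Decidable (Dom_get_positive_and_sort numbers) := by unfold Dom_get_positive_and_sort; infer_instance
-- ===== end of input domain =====

-- B replaces A's hand-rolled bubble sort by the built-in stable sort (idiomatic one-liner).

-- ===== PORT A =====
-- swap_elements(n, j, j+1) inlined into one compare-and-swap step at index j
-- (indices j, j+1 are always in range when this is called, so getD's default is never used)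
def pvSwapStep (l : List Int) (j : Nat) : List Int :=
  if l.getD j 0 > l.getD (j+1) 0 then
    let temp := l.getD j 0
    let l2 := l.set j (l.getD (j+1) 0)
    l2.set (j+1) temp
  else l

-- inner loop: for j in range(len(numbers) - 1)
def pvInnerPass (l : List Int) : List Int :=
  (List.range (l.length - 1)).foldl pvSwapStep l

def get_positive_and_sort (numbers : List Int) : List Int :=
  let numbers1 := numbers.filter (fun num => decide (num > 0))
  (List.range numbers1.length).foldl (fun acc _ => pvInnerPass acc) numbers1

-- ===== PORT B =====
def get_positive_and_sort_alt (numbers : List Int) : List Int :=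
  PySem.List.sorted (numbers.filter (fun num => decide (num > 0))) (fun x => x) false

-- ===== PRECONDITION & SPEC =====
def Spec_get_positive_and_sort (numbers : List Int) (out : List Int) : Prop := out = get_positive_and_sort_alt numbers
instance (numbers : List Int) (out : List Int) : Decidable (Spec_get_positive_and_sort numbers out) := by unfold Spec_get_positive_and_sort; infer_instance

-- ===== CLAIM (what is proved, stated in full; the proofs are below) =====
def Claim_equal_get_positive_and_sort : Prop := ∀ (numbers : List Int), Dom_get_positive_and_sort numbers → Spec_get_positive_and_sort numbers (get_positive_and_sort numbers)

-- ===== LEMMAS AND PROOFS =====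

-- structural form of one bubble pass
def pvBpass : List Int → List Int
  | [] => []
  | [a] => [a]
  | a :: b :: t => if b < a then b :: pvBpass (a :: t) else a :: pvBpass (b :: t)

theorem pvSwapStep_cons (c : Int) (r : List Int) (j : Nat) :
    pvSwapStep (c :: r) (j+1) = c :: pvSwapStep r j := by
  simp [pvSwapStep, List.getD]
  split <;> rfl

theorem pvFold_shift (m : Nat) (c : Int) (r : List Int) (k : Nat) :
    (List.range' (k+1) m).foldl pvSwapStep (c :: r) = c :: (List.range' k m).foldl pvSwapStep r := by
  induction m generalizing c r k with
  | zero => simp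
  | succ m ih => simp [List.range'_succ, pvSwapStep_cons, ih]

theorem pvInnerPass_eq_bpass (l : List Int) : pvInnerPass l = pvBpass l := by
  induction l using pvBpass.induct with
  | case1 => simp [pvInnerPass, pvBpass]
  | case2 a => simp [pvInnerPass, pvBpass]
  | case3 a b t h ih =>
    have h0 : pvSwapStep (a :: b :: t) 0 = b :: a :: t := by
      simp [pvSwapStep, List.getD]
      omega
    simp only [pvInnerPass] at ih ⊢
    simp only [List.range_eq_range', List.length_cons, Nat.add_sub_cancel,
      List.range'_succ, List.foldl_cons, h0]
    rw [pvFold_shift, ← List.range_eq_range']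
    simp only [List.length_cons, Nat.add_sub_cancel] at ih
    rw [ih]
    simp [pvBpass, h]
  | case4 a b t h ih =>
    have h0 : pvSwapStep (a :: b :: t) 0 = a :: b :: t := by
      simp [pvSwapStep, List.getD]
      omega
    simp only [pvInnerPass] at ih ⊢
    simp only [List.range_eq_range', List.length_cons, Nat.add_sub_cancel,
      List.range'_succ, List.foldl_cons, h0]
    rw [pvFold_shift, ← List.range_eq_range']
    simp only [List.length_cons, Nat.add_sub_cancel] at ih
    rw [ih]
    simp [pvBpass, h]

theorem pvBpass_perm (l : List Int) : (pvBpass l).Perm l := by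
  induction l using pvBpass.induct with
  | case1 => simp [pvBpass]
  | case2 a => simp [pvBpass]
  | case3 a b t h ih =>
    simp only [pvBpass, if_pos h]
    exact (ih.cons b).trans (List.Perm.swap a b t)
  | case4 a b t h ih =>
    simp only [pvBpass, if_neg h]
    exact ih.cons a

theorem pvBpass_sorted_fix (l : List Int) (h : l.Pairwise (· ≤ ·)) : pvBpass l = l := by
  induction l using pvBpass.induct with
  | case1 => simp [pvBpass]
  | case2 a => simp [pvBpass]
  | case3 a b t hlt ih =>
    exfalso
    have : a ≤ b := (List.pairwise_cons.mp h).1 b (by simp)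
    omega
  | case4 a b t hlt ih =>
    simp only [pvBpass, if_neg hlt]
    rw [ih (List.pairwise_cons.mp h).2]

theorem pvBpass_last : ∀ (a : Int) (p : List Int),
    ∃ q M, pvBpass (a :: p) = q ++ [M] ∧ ∀ x ∈ a :: p, x ≤ M := by
  intro a p
  induction p generalizing a with
  | nil => exact ⟨[], a, by simp [pvBpass], by simp⟩
  | cons b t ih =>
    by_cases h : b < a
    · obtain ⟨q, M, hq, hM⟩ := ih a
      refine ⟨b :: q, M, by simp [pvBpass, if_pos h, hq], ?_⟩
      intro x hx
      simp only [List.mem_cons] at hx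
      rcases hx with rfl | rfl | hx
      · exact hM x (by simp)
      · have := hM a (by simp); omega
      · exact hM x (by simp [hx])
    · obtain ⟨q, M, hq, hM⟩ := ih b
      refine ⟨a :: q, M, by simp [pvBpass, if_neg h, hq], ?_⟩
      intro x hx
      simp only [List.mem_cons] at hx
      rcases hx with rfl | rfl | hx
      · have := hM b (by simp); omega
      · exact hM x (by simp)
      · exact hM x (by simp [hx])

theorem pvBpass_append_sorted : ∀ (p : List Int) (a : Int) (s : List Int),
    s.Pairwise (· ≤ ·) → (∀ x ∈ a :: p, ∀ y ∈ s, x ≤ y) →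
    pvBpass ((a :: p) ++ s) = pvBpass (a :: p) ++ s := by
  intro p
  induction p with
  | nil =>
    intro a s hs hd
    have hpw : (a :: s).Pairwise (· ≤ ·) :=
      List.pairwise_cons.mpr ⟨fun y hy => hd a (by simp) y hy, hs⟩
    rw [List.cons_append, List.nil_append, pvBpass_sorted_fix _ hpw]
    simp [pvBpass]
  | cons b t ih =>
    intro a s hs hd
    by_cases h : b < a
    · have hsub : ∀ x ∈ a :: t, ∀ y ∈ s, x ≤ y := by
        intro x hx y hy
        refine hd x ?_ y hy
        simp only [List.mem_cons] at hx ⊢; tauto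
      have := ih a s hs hsub
      simp only [List.cons_append, pvBpass, if_pos h] at this ⊢
      rw [this]
    · have hsub : ∀ x ∈ b :: t, ∀ y ∈ s, x ≤ y := by
        intro x hx y hy
        refine hd x ?_ y hy
        simp only [List.mem_cons] at hx ⊢; tauto
      have := ih b s hs hsub
      simp only [List.cons_append, pvBpass, if_neg h] at this ⊢
      rw [this]

theorem pvKey : ∀ (k : Nat) (p s : List Int), p.length ≤ k →
    s.Pairwise (· ≤ ·) → (∀ x ∈ p, ∀ y ∈ s, x ≤ y) →
    (pvBpass^[k] (p ++ s)).Pairwise (· ≤ ·) := by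
  intro k
  induction k with
  | zero =>
    intro p s hlen hs hd
    have : p = [] := List.length_eq_zero_iff.mp (Nat.le_zero.mp hlen)
    simpa [this]
  | succ k ih =>
    intro p s hlen hs hd
    cases p with
    | nil =>
      rw [Function.iterate_succ_apply]
      simp only [List.nil_append]
      rw [pvBpass_sorted_fix s hs]
      simpa using ih [] s (by simp) hs (by simp)
    | cons a p' =>
      obtain ⟨q, M, hq, hM⟩ := pvBpass_last a p'
      have hperm : (q ++ [M]).Perm (a :: p') := hq ▸ pvBpass_perm (a :: p')
      have hmemM : M ∈ a :: p' := hperm.mem_iff.mp (by simp)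
      have hmemq : ∀ x ∈ q, x ∈ a :: p' := fun x hx => hperm.mem_iff.mp (by simp [hx])
      rw [Function.iterate_succ_apply,
        pvBpass_append_sorted p' a s hs hd, hq, List.append_assoc]
      refine ih q (M :: s) ?_ ?_ ?_
      · have hlq : (q ++ [M]).length = (a :: p').length := hperm.length_eq
        simp only [List.length_append, List.length_cons] at hlq
        simp only [List.length_cons] at hlen
        omega
      · exact List.pairwise_cons.mpr ⟨fun y hy => hd M hmemM y hy, hs⟩
      · intro x hx y hy
        simp only [List.mem_cons] at hy
        rcases hy with rfl | hy
        · exact hM x (hmemq x hx)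
        · exact hd x (hmemq x hx) y hy

theorem pvIter_perm (k : Nat) (l : List Int) : (pvBpass^[k] l).Perm l := by
  induction k with
  | zero => simp
  | succ k ih => rw [Function.iterate_succ_apply']; exact (pvBpass_perm _).trans ih

theorem pvFoldl_iterate {α : Type} (f : α → α) : ∀ (n : Nat) (l : α),
    (List.range n).foldl (fun acc _ => f acc) l = f^[n] l := by
  intro n
  induction n with
  | zero => simp
  | succ n ih =>
    intro l
    rw [List.range_succ, List.foldl_append, ih, Function.iterate_succ_apply']
    rfl

-- ===== VERDICT (by name: the statement is the Claim_ definition above) =====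
theorem get_positive_and_sort_spec : Claim_equal_get_positive_and_sort := by
  intro numbers _
  unfold Spec_get_positive_and_sort get_positive_and_sort get_positive_and_sort_alt
  set xs := numbers.filter (fun num => decide (num > 0)) with hxs
  rw [pvFoldl_iterate]
  rw [show pvInnerPass = pvBpass from funext pvInnerPass_eq_bpass]
  exact (PySem.List.sorted_id_eq_of_perm_of_pairwise xs _ (pvIter_perm _ _)
    (by simpa using pvKey xs.length xs [] le_rfl (by simp) (by simp))).symm
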